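-- pv_equiv track=rewrite | github.com/DragunWF/Competitive-Programming | CodeChef/Practice/Python/NONNEGPROD.py | solve
-- ===== SOURCE A (Python) =====
-- def array_product(arr):
--     product = arr[0]
--     for i in range(1, len(arr)):
--         product *= arr[i]
--     return product
--
-- def solve(a):
--     ans = 0
--     while array_product(a) < 0:
--         for i in range(len(a)):
--             if a[i] < 0:
--                 a.pop(i)
--                 break
--         ans += 1
--     return ans
-- ===== SOURCE B (Python) =====
-- def solve(a):
--     # One pass: parity of negatives + zero detection instead of repeated full products.
--     neg = 0
--     has_zero = False
--     first_neg = -1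
--     for i, x in enumerate(a):
--         if x < 0:
--             neg += 1
--             if first_neg == -1:
--                 first_neg = i
--         elif x == 0:
--             has_zero = True
--     if neg % 2 == 1 and not has_zero:
--         a.pop(first_neg)  # same mutation A performs
--         return 1
--     return 0
-- ===== Notes on version B (the rewrite author's own statement) =====
-- stated objective: faster
-- what changed: Replaces the while-loop that recomputes the full array product before each removal with a single pass counting negatives (parity) and detecting zeros: the product is negative iff the negative count is odd and no zero occurs, so the answer is 1 or 0 directly (the same first negative is popped). (A raises IndexError on the empty list and on a single negative element; Pre_ excludes exactly those.)
import Mathlib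
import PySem

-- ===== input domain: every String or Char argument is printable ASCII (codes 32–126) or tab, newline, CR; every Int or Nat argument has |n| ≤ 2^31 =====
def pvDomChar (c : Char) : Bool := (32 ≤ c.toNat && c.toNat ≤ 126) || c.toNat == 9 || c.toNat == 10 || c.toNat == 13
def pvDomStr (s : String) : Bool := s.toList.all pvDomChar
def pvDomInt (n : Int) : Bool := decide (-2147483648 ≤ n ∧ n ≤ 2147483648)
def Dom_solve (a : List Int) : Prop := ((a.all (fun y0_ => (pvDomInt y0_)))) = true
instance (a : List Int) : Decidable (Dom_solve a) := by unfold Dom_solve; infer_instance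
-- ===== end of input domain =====

-- B replaces A's repeated whole-array products with one pass counting negative parity and zeros;
-- equivalence is about the RETURN value (both Pythons pop the first negative when they return 1).

-- ===== PORT A =====
-- array_product: product = arr[0]; for i in range(1, len(arr)): product *= arr[i]
-- (arr[0] raises on empty in Python; headD 0 is only reached outside Pre_solve)
def arrayProduct (arr : List Int) : Int := arr.tail.foldl (· * ·) (arr.headD 0)

-- for i in range(len(a)): if a[i] < 0: a.pop(i); break
def popFirstNeg : List Int → List Int
  | [] => []
  | x :: xs => if x < 0 then xs else x :: popFirstNeg xs

-- while array_product(a) < 0: pop first negative; ans += 1  (fuel bounds the loop; each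
-- iteration that fires removes one element, so length+1 fuel never runs out inside Pre_)
def solveLoop : Nat → List Int → Int → Int
  | 0, _, ans => ans
  | fuel + 1, a, ans =>
      if arrayProduct a < 0 then solveLoop fuel (popFirstNeg a) (ans + 1) else ans

def solve (a : List Int) : Int := solveLoop (a.length + 1) a 0

-- ===== PORT B =====
-- state = (neg, has_zero); Source B's first_neg only serves the in-place pop, which Lean does not model
def solveStep (s : Int × Bool) (x : Int) : Int × Bool :=
  if x < 0 then (s.1 + 1, s.2) else if x = 0 then (s.1, true) else s

def solve_alt (a : List Int) : Int :=
  let st := a.foldl solveStep (0, false)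
  if st.1 % 2 == 1 && !st.2 then 1 else 0

-- ===== PRECONDITION & SPEC =====
-- Pre_ excludes exactly the inputs where A raises IndexError: the empty list, and a
-- single-element negative list (the pop empties it before the loop re-checks the product).
def Pre_solve (a : List Int) : Prop := a ≠ [] ∧ ¬(a.length = 1 ∧ a.headD 0 < 0)
instance (a : List Int) : Decidable (Pre_solve a) := by unfold Pre_solve; infer_instance

def pvWitness_solve : List Int := [2, -3]

def Spec_solve (a : List Int) (out : Int) : Prop := out = solve_alt a
instance (a : List Int) (out : Int) : Decidable (Spec_solve a out) := by unfold Spec_solve; infer_instance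

-- ===== CLAIM (what is proved, stated in full; the proofs are below) =====
def Claim_equal_solve : Prop := ∀ (a : List Int), Dom_solve a → Pre_solve a → Spec_solve a (solve a)

-- ===== LEMMAS AND PROOFS =====

def negP (x : Int) : Bool := decide (x < 0)

lemma foldl_solveStep (a : List Int) : ∀ c b,
    a.foldl solveStep (c, b) = (c + (a.countP negP : Int), b || a.any (fun x => x == 0)) := by
  induction a with
  | nil => simp
  | cons x xs ih =>
    intro c b
    by_cases hx : x < 0
    · have hx0 : (x == 0) = false := by simp; omega
      simp [solveStep, hx, ih, List.countP_cons, negP, hx0]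
      push_cast; ring
    · by_cases hz : x = 0
      · simp [solveStep, hx, hz, ih, List.countP_cons, negP]
      · have hx0 : (x == 0) = false := by simp [hz]
        simp [solveStep, hx, hz, ih, List.countP_cons, negP, hx0]

lemma solve_alt_eq (a : List Int) :
    solve_alt a = if (a.countP negP) % 2 = 1 ∧ ¬ (0 : Int) ∈ a then 1 else 0 := by
  have h := foldl_solveStep a 0 false
  simp only [solve_alt, h]
  have hm : (a.any (fun x => x == 0)) = true ↔ (0:Int) ∈ a := by
    rw [List.any_eq_true]
    constructor
    · rintro ⟨x, hx, he⟩
      have hx0 : x = 0 := by simpa using he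
      rw [hx0] at hx; exact hx
    · intro h; exact ⟨0, h, by simp⟩
  by_cases h1 : (a.countP negP) % 2 = 1 <;> by_cases h2 : (0:Int) ∈ a <;>
    simp [hm, h1, h2] <;> omega

lemma foldl_mul_eq (xs : List Int) : ∀ x : Int, xs.foldl (· * ·) x = x * xs.prod := by
  induction xs with
  | nil => simp
  | cons y ys ih => intro x; simp [List.foldl_cons, ih, List.prod_cons]; ring

lemma arrayProduct_eq_prod (a : List Int) (h : a ≠ []) : arrayProduct a = a.prod := by
  cases a with
  | nil => simp at h
  | cons x xs => simp [arrayProduct, foldl_mul_eq, List.prod_cons]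

lemma prod_neg_iff (a : List Int) (hz : (0:Int) ∉ a) :
    a.prod < 0 ↔ a.countP negP % 2 = 1 := by
  induction a with
  | nil => simp
  | cons x xs ih =>
    have hx : x ≠ 0 := fun h => hz (by simp [h])
    have hz' : (0:Int) ∉ xs := fun h => hz (List.mem_cons_of_mem _ h)
    have hp : xs.prod ≠ 0 := by
      intro h
      rcases List.prod_eq_zero_iff.mp h with h0
      exact hz' h0
    have ihx := ih hz'
    rw [List.prod_cons, List.countP_cons]
    rcases lt_trichotomy x 0 with hneg | h0 | hpos
    · have : x * xs.prod < 0 ↔ ¬ xs.prod < 0 := by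
        constructor
        · intro h hlt
          nlinarith
        · intro h
          have : 0 < xs.prod := lt_of_le_of_ne (not_lt.mp h) (Ne.symm hp)
          nlinarith
      rw [this, ihx]
      simp [negP, hneg]
      omega
    · exact absurd h0 hx
    · have : x * xs.prod < 0 ↔ xs.prod < 0 := by
        constructor
        · intro h
          nlinarith
        · intro h; nlinarith
      rw [this, ihx]
      simp [negP, not_lt.mpr (le_of_lt hpos)]

lemma popFirstNeg_facts (a : List Int) (h : 0 < a.countP negP) :
    (popFirstNeg a).countP negP + 1 = a.countP negP ∧
    (popFirstNeg a).length + 1 = a.length ∧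
    (∀ y, y ∈ popFirstNeg a → y ∈ a) := by
  induction a with
  | nil => simp at h
  | cons x xs ih =>
    by_cases hx : x < 0
    · refine ⟨?_, ?_, ?_⟩
      · simp [popFirstNeg, hx, List.countP_cons, negP]
      · simp [popFirstNeg, hx]
      · intro y hy; simp [popFirstNeg, hx] at hy; simp [hy]
    · have hc : 0 < xs.countP negP := by
        simpa [List.countP_cons, negP, hx] using h
      obtain ⟨h1, h2, h3⟩ := ih hc
      refine ⟨?_, ?_, ?_⟩
      · simp only [popFirstNeg, if_neg hx, List.countP_cons]
        simp [negP, hx] at *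
        omega
      · simp only [popFirstNeg, if_neg hx, List.length_cons]
        omega
      · intro y hy
        simp only [popFirstNeg, if_neg hx, List.mem_cons] at hy
        rcases hy with hy | hy
        · simp [hy]
        · exact List.mem_cons_of_mem _ (h3 y hy)

lemma prod_nonneg_case (a : List Int) (h : ¬ (a.countP negP % 2 = 1 ∧ ¬ (0:Int) ∈ a))
    (hne : a ≠ []) : ¬ arrayProduct a < 0 := by
  rw [arrayProduct_eq_prod a hne]
  by_cases hz : (0:Int) ∈ a
  · rw [List.prod_eq_zero hz]; omega
  · rw [prod_neg_iff a hz]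
    intro hc
    exact h ⟨hc, hz⟩

-- ===== VERDICT (by name: the statements are the Claim_ definitions above) =====
theorem solve_spec : Claim_equal_solve := by
  intro a _ hpre
  unfold Spec_solve
  rw [solve_alt_eq]
  obtain ⟨hne, hone⟩ := hpre
  unfold solve
  by_cases hcase : a.countP negP % 2 = 1 ∧ ¬ (0:Int) ∈ a
  · obtain ⟨hodd, hz⟩ := hcase
    have hpos : 0 < a.countP negP := by omega
    have hprodneg : arrayProduct a < 0 := by
      rw [arrayProduct_eq_prod a hne, prod_neg_iff a hz]; exact hodd
    obtain ⟨hc, hl, hmem⟩ := popFirstNeg_facts a hpos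
    -- a has length ≥ 2: length 1 with odd neg count means head negative, excluded by Pre_
    have hlen2 : 2 ≤ a.length := by
      cases a with
      | nil => simp at hne
      | cons x xs =>
        cases xs with
        | nil =>
          exfalso
          have hx : x < 0 := by
            by_contra hx
            simp [List.countP_cons, negP, hx] at hodd
          exact hone ⟨by simp, by simpa using hx⟩
        | cons y ys => simp
    have hne' : popFirstNeg a ≠ [] := by
      intro h
      rw [h] at hl
      simp at hl
      omega
    have hz' : (0:Int) ∉ popFirstNeg a := fun h => hz (hmem 0 h)
    have heven : ¬ (popFirstNeg a).countP negP % 2 = 1 := by omega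
    have hnotneg : ¬ arrayProduct (popFirstNeg a) < 0 :=
      prod_nonneg_case _ (by tauto) hne'
    -- unfold two loop steps
    have hfuel : a.length + 1 = (a.length - 1) + 1 + 1 := by omega
    rw [hfuel]
    simp only [solveLoop, if_pos hprodneg]
    have hfuel2 : ∃ k, a.length - 1 = k + 1 := ⟨a.length - 2, by omega⟩
    obtain ⟨k, hk⟩ := hfuel2
    rw [hk]
    simp [solveLoop, hnotneg, hodd, hz]
  · have hnot : ¬ arrayProduct a < 0 := prod_nonneg_case a hcase hne
    simp only [solveLoop, if_neg hnot]
    simp at hcase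
    by_cases h1 : a.countP negP % 2 = 1
    · simp [h1, hcase h1]
    · simp [h1]

-- ===== VERDICT (by name: the statement is the Claim_ definition above) =====
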